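-- pv_equiv track=rewrite | github.com/pytorch/pytorch | caffe2/python/operator_test/dense_vector_to_id_list_op_test.py | dense_vector_to_id_list_ref
-- ===== SOURCE A (Python) =====
-- def dense_vector_to_id_list_ref(*arg):
--     arg = arg[0]
--     batch_size = len(arg)
--     assert batch_size > 0
--     out_length = []
--     out_values = []
--     for row in arg:
--         length = 0
--         for idx, entry in enumerate(row):
--             if entry != 0:
--                 out_values += [idx]
--                 length += 1
--         out_length += [length]
--     return (out_length, out_values)
-- ===== SOURCE B (Python) =====
-- def dense_vector_to_id_list_ref(*arg):
--     arg = arg[0]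
--     batch_size = len(arg)
--     assert batch_size > 0
--     # flat index of all nonzero coordinates: (row number, column number) pairs
--     pairs = [(r, c)
--              for r, row in enumerate(arg)
--              for c, entry in enumerate(row)
--              if entry != 0]
--     # per-row lengths recovered by hash-grouping the row numbers
--     counts = {}
--     for r, _ in pairs:
--         counts[r] = counts.get(r, 0) + 1
--     out_length = [counts.get(r, 0) for r in range(batch_size)]
--     out_values = [c for _, c in pairs]
--     return (out_length, out_values)
-- ===== Notes on version B (the rewrite author's own statement) =====
-- stated objective: alternative
-- what changed: A interleaves one nested pass maintaining a running per-row counter and a flat value accumulator; B builds a flat index of (row, column) pairs of all nonzero entries, recovers per-row lengths by hash-grouping the row numbers in a dict, and projects the columns for the values.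
import Mathlib
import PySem

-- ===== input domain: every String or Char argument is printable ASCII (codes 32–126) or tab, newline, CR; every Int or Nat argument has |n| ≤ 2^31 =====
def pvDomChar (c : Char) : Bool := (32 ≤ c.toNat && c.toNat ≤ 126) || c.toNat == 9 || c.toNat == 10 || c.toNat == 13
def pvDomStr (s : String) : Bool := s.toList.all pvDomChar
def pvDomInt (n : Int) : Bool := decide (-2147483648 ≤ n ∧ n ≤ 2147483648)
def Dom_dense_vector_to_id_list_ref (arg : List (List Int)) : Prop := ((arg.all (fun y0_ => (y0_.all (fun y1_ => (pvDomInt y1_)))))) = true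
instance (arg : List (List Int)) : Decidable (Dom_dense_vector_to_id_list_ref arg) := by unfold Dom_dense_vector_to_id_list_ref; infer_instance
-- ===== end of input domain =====

-- B replaces A's interleaved per-row counter pass by a flat (row, column) index of the
-- nonzero entries plus a dict that groups-and-counts the row numbers (alternative, same cost).

-- ===== PORT A =====
-- inner loop: state (out_values, length); appends idx and bumps length when entry ≠ 0
def pvAInner (st : List Int × Int) (p : Int × Int) : List Int × Int :=
  if p.2 ≠ 0 then (st.1 ++ [p.1], st.2 + 1) else st

-- outer loop: state (out_length, out_values)
def pvAOuter (st : List Int × List Int) (row : List Int) : List Int × List Int :=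
  let r := (PySem.List.enumerate row).foldl pvAInner (st.2, 0)
  (st.1 ++ [r.2], r.1)

def dense_vector_to_id_list_ref (arg : List (List Int)) : List Int × List Int :=
  arg.foldl pvAOuter ([], [])

-- ===== PORT B =====
-- the flat comprehension: (r, c) for every nonzero entry
def pvPairs (arg : List (List Int)) : List (Int × Int) :=
  (PySem.List.enumerate arg).flatMap (fun p =>
    ((PySem.List.enumerate p.2).filter (fun q => q.2 ≠ 0)).map (fun q => (p.1, q.1)))

def dense_vector_to_id_list_ref_alt (arg : List (List Int)) : List Int × List Int :=
  let pairs := pvPairs arg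
  let counts := pairs.foldl (fun d p => d.insert p.1 (d.getD p.1 0 + 1)) PySem.Dict.empty
  ((PySem.List.pyRange 0 (arg.length : Int) 1).map (fun r => counts.getD r 0),
   pairs.map (fun p => p.2))

-- ===== PRECONDITION & SPEC =====
-- A asserts batch_size > 0, raising AssertionError on the empty list; Pre_ excludes it.
def Pre_dense_vector_to_id_list_ref (arg : List (List Int)) : Prop := arg ≠ []
instance (arg : List (List Int)) : Decidable (Pre_dense_vector_to_id_list_ref arg) := by unfold Pre_dense_vector_to_id_list_ref; infer_instance
def pvWitness_dense_vector_to_id_list_ref : List (List Int) := [[0, 1, 2], [0, 0]]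

def Spec_dense_vector_to_id_list_ref (arg : List (List Int)) (out : List Int × List Int) : Prop := out = dense_vector_to_id_list_ref_alt arg
instance (arg : List (List Int)) (out : List Int × List Int) : Decidable (Spec_dense_vector_to_id_list_ref arg out) := by unfold Spec_dense_vector_to_id_list_ref; infer_instance

-- ===== CLAIM (what is proved, stated in full; the proofs are below) =====
def Claim_equal_dense_vector_to_id_list_ref : Prop := ∀ (arg : List (List Int)), Dom_dense_vector_to_id_list_ref arg → Pre_dense_vector_to_id_list_ref arg → Spec_dense_vector_to_id_list_ref arg (dense_vector_to_id_list_ref arg)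

-- ===== LEMMAS AND PROOFS =====
-- nonzero-index list of one row (proof-side abbreviation shared by both characterisations)
def pvRowIdx (row : List Int) : List Int :=
  ((PySem.List.enumerate row).filter (fun q => q.2 ≠ 0)).map (fun q => q.1)

theorem pvInner_char (l : List (Int × Int)) (vs : List Int) (n : Int) :
    l.foldl pvAInner (vs, n)
      = (vs ++ (l.filter (fun p => p.2 ≠ 0)).map (fun p => p.1),
         n + ((l.filter (fun p => p.2 ≠ 0)).length : Int)) := by
  induction l generalizing vs n with
  | nil => simp
  | cons p t ih =>
    by_cases h : p.2 ≠ 0 <;>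
      simp [List.foldl, pvAInner, h, List.filter, ih] <;> omega

theorem pvOuter_char (rows : List (List Int)) (ls : List Int) (vs : List Int) :
    rows.foldl pvAOuter (ls, vs)
      = (ls ++ (rows.map pvRowIdx).map (fun r => (r.length : Int)),
         vs ++ (rows.map pvRowIdx).flatten) := by
  induction rows generalizing ls vs with
  | nil => simp
  | cons row t ih =>
    simp only [List.foldl, pvAOuter, pvInner_char, List.map_cons, List.flatten_cons, ih,
      pvRowIdx]
    simp [List.append_assoc]

-- the row-number multiset of the flat pairs, as a flatMap of replicates
theorem pvPairs_fst (rows : List (List Int)) (s : Int) :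
    (((PySem.List.enumerate rows s).flatMap (fun p =>
        ((PySem.List.enumerate p.2).filter (fun q => q.2 ≠ 0)).map (fun q => (p.1, q.1)))).map
      Prod.fst)
      = (PySem.List.enumerate rows s).flatMap
          (fun p => List.replicate (pvRowIdx p.2).length p.1) := by
  simp [List.map_flatMap, pvRowIdx, List.map_map, Function.comp_def,
    List.map_const']

theorem pvCount_lt (rows : List (List Int)) (s r : Int) (h : r < s) :
    (((PySem.List.enumerate rows s).flatMap
        (fun p => List.replicate (pvRowIdx p.2).length p.1)).count r) = 0 := by
  induction rows generalizing s with
  | nil => simp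
  | cons row t ih =>
    simp only [PySem.List.enumerate_cons, List.flatMap_cons, List.count_append,
      List.count_replicate]
    rw [ih (s + 1) (by omega)]
    have hne : ¬ (s = r) := by omega
    simp [hne]

theorem pvCount_at (rows : List (List Int)) (s : Int) (k : Nat) (h : k < rows.length) :
    (((PySem.List.enumerate rows s).flatMap
        (fun p => List.replicate (pvRowIdx p.2).length p.1)).count (s + k))
      = (pvRowIdx rows[k]).length := by
  induction rows generalizing s k with
  | nil => simp at h
  | cons row t ih =>
    simp only [PySem.List.enumerate_cons, List.flatMap_cons, List.count_append,
      List.count_replicate]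
    cases k with
    | zero =>
      simp only [Nat.cast_zero, add_zero]
      rw [pvCount_lt t (s + 1) s (by omega)]
      simp
    | succ k =>
      have hk : k < t.length := by simpa using h
      have := ih (s + 1) k hk
      rw [show s + (↑(k + 1) : Int) = (s + 1) + ↑k by push_cast; ring, this]
      have hne : ¬ (s = (s + 1) + (k : Int)) := by omega
      simp [hne]

-- B's second component is the flattened per-row index lists
theorem pvPairs_snd (rows : List (List Int)) :
    (pvPairs rows).map (fun p => p.2) = (rows.map pvRowIdx).flatten := by
  unfold pvPairs
  rw [List.map_flatMap]
  have : ∀ s : Int, (PySem.List.enumerate rows s).flatMap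
      (fun p => (((PySem.List.enumerate p.2).filter (fun q => q.2 ≠ 0)).map
        (fun q => (p.1, q.1))).map (fun p => p.2))
      = (rows.map pvRowIdx).flatten := by
    intro s
    induction rows generalizing s with
    | nil => simp
    | cons row t ih =>
      simp only [PySem.List.enumerate_cons, List.flatMap_cons, List.map_cons,
        List.flatten_cons, ih]
      simp [pvRowIdx, List.map_map, Function.comp_def]
  exact this 0

theorem pvFoldl_pairs (l : List (Int × Int)) (d : PySem.Dict Int Int) :
    l.foldl (fun d p => d.insert p.1 (d.getD p.1 0 + 1)) d
      = (l.map Prod.fst).foldl (fun d x => d.insert x (d.getD x 0 + 1)) d := by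
  induction l generalizing d with
  | nil => rfl
  | cons p t ih => simp [List.foldl, ih]

-- B's first component is the per-row lengths
theorem pv_alt_lengths (rows : List (List Int)) :
    (PySem.List.pyRange 0 (rows.length : Int) 1).map
        (fun r => (((pvPairs rows).foldl
          (fun d p => d.insert p.1 (d.getD p.1 0 + 1)) PySem.Dict.empty).getD r 0))
      = (rows.map pvRowIdx).map (fun r => (r.length : Int)) := by
  have hc : ∀ r : Int, (((pvPairs rows).foldl
      (fun d p => d.insert p.1 (d.getD p.1 0 + 1)) PySem.Dict.empty).getD r 0)
      = (((pvPairs rows).map Prod.fst).count r : Int) := by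
    intro r
    rw [pvFoldl_pairs, PySem.Dict.getD_foldl_insert_add_one]
    simp
  apply List.ext_getElem
  · simp [PySem.List.length_pyRange_one]
  · intro i h1 h2
    have hi : i < rows.length := by
      simpa [PySem.List.length_pyRange_one] using h1
    rw [List.getElem_map, PySem.List.getElem_pyRange_one, hc,
      show (0 : Int) + i = 0 + (i : Int) by ring]
    unfold pvPairs
    rw [pvPairs_fst, pvCount_at rows 0 i hi]
    simp

-- ===== VERDICT (by name: the statement is the Claim_ definition above) =====
theorem dense_vector_to_id_list_ref_spec : Claim_equal_dense_vector_to_id_list_ref := by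
  intro arg _ _
  show dense_vector_to_id_list_ref arg = dense_vector_to_id_list_ref_alt arg
  simp only [dense_vector_to_id_list_ref, dense_vector_to_id_list_ref_alt, pvOuter_char,
    pv_alt_lengths, pvPairs_snd]
  simp
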